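-- pv_equiv track=rewrite | github.com/hadjt/NWS_simulations_postproc | HCCP_python_complete_CEDA.py | create_ann_seas_lst
-- ===== SOURCE A (Python) =====
-- def create_ann_seas_lst(yrmat):
--     """
--     Create a list of the months and years that make up annual and seasonal means, for a given list of years
--
--     Jonathan Tinker 29/03/2023
--     """
--     ann_lst = []
--     djf_lst = []
--     jja_lst = []
--     mam_lst = []
--     son_lst = []
--     for yr in yrmat:
--
--         tmp_ann_lst = []
--         tmp_djf_lst = []
--         tmp_jja_lst = []
--         tmp_mam_lst = []
--         tmp_son_lst = []
--         for mi in range(12):tmp_ann_lst.append('%04i%02i'%(yr,mi+1))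
--         for mi in [2,3,4]:tmp_mam_lst.append('%04i%02i'%(yr,mi+1))
--         for mi in [5,6,7]:tmp_jja_lst.append('%04i%02i'%(yr,mi+1))
--         for mi in [8,9,10]:tmp_son_lst.append('%04i%02i'%(yr,mi+1))
--         tmp_djf_lst.append('%04i12'%(yr-1))
--         for mi in [0,1]:tmp_djf_lst.append('%04i%02i'%(yr,mi+1))
--
--         ann_lst.append(tmp_ann_lst)
--         djf_lst.append(tmp_djf_lst)
--         mam_lst.append(tmp_mam_lst)
--         jja_lst.append(tmp_jja_lst)
--         son_lst.append(tmp_son_lst)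
--
--     return ann_lst,djf_lst,mam_lst,jja_lst,son_lst
-- ===== SOURCE B (Python) =====
-- # B: one chronological token stream per year (Dec of yr-1, then months 1..12),
-- # each token dispatched into buckets by a month->targets table.
-- _BUCKETS = {
--     0: ('djf',),
--     1: ('ann', 'djf'), 2: ('ann', 'djf'),
--     3: ('ann', 'mam'), 4: ('ann', 'mam'), 5: ('ann', 'mam'),
--     6: ('ann', 'jja'), 7: ('ann', 'jja'), 8: ('ann', 'jja'),
--     9: ('ann', 'son'), 10: ('ann', 'son'), 11: ('ann', 'son'),
--     12: ('ann',),
-- }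
--
-- def create_ann_seas_lst(yrmat):
--     """Build annual/seasonal month-year string lists per year (table-driven stream)."""
--     out = {k: [] for k in ('ann', 'djf', 'mam', 'jja', 'son')}
--     for yr in yrmat:
--         row = {k: [] for k in out}
--         for tok in range(13):  # tok 0 = December of yr-1, tok m = month m of yr
--             s = '%04i%02i' % ((yr - 1, 12) if tok == 0 else (yr, tok))
--             for k in _BUCKETS[tok]:
--                 row[k].append(s)
--         for k in out:
--             out[k].append(row[k])
--     return out['ann'], out['djf'], out['mam'], out['jja'], out['son']
-- ===== Notes on version B (the rewrite author's own statement) =====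
-- stated objective: alternative
-- what changed: Replaces A's five independent per-season formatting loops inside the year loop with a single chronological 13-token stream per year (Dec of yr-1 then months 1-12) dispatched through a month-to-buckets lookup table into a dict of five accumulating lists.
import Mathlib
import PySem

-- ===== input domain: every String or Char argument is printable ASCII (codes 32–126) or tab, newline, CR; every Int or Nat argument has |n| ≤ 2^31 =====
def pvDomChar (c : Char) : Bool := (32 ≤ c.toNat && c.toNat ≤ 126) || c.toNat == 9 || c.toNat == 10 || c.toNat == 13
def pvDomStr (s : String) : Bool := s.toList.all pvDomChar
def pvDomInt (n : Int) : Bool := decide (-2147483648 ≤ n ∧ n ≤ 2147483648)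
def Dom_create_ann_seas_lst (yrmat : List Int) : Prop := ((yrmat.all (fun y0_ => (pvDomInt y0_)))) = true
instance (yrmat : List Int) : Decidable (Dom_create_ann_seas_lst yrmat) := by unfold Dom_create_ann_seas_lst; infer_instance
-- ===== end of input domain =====

-- B replaces A's five independent per-season formatting loops by one chronological
-- 13-token stream per year dispatched through a month->buckets table into a dict of
-- five accumulating lists (objective: alternative).

-- shared formatting helper: Python '%0<w>i' % n, exact for every Int
-- (zero-pad to total width w, sign counted in the width, zeros after the sign)
def pvPad0 (w : Nat) (s : List Char) : List Char := List.replicate (w - s.length) '0' ++ s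
def pvFmt0 (w : Nat) (n : Int) : String :=
  if n < 0 then String.ofList ('-' :: pvPad0 (w - 1) (PySem.Int.toChars (-n)))
  else String.ofList (pvPad0 w (PySem.Int.toChars n))
-- '%04i%02i' % (yr, m)
def pvYM (yr : Int) (m : Int) : String := pvFmt0 4 yr ++ pvFmt0 2 m

-- ===== PORT A =====
def create_ann_seas_lst (yrmat : List Int) : List (List String) × List (List String) × List (List String) × List (List String) × List (List String) :=
  yrmat.foldl
    (fun acc yr =>
      let tmp_ann := (PySem.List.pyRange 0 12 1).foldl (fun l mi => l ++ [pvYM yr (mi + 1)]) []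
      let tmp_mam := ([2, 3, 4] : List Int).foldl (fun l mi => l ++ [pvYM yr (mi + 1)]) []
      let tmp_jja := ([5, 6, 7] : List Int).foldl (fun l mi => l ++ [pvYM yr (mi + 1)]) []
      let tmp_son := ([8, 9, 10] : List Int).foldl (fun l mi => l ++ [pvYM yr (mi + 1)]) []
      let tmp_djf := ([] : List String) ++ [pvFmt0 4 (yr - 1) ++ "12"]
      let tmp_djf := ([0, 1] : List Int).foldl (fun l mi => l ++ [pvYM yr (mi + 1)]) tmp_djf
      (acc.1 ++ [tmp_ann], acc.2.1 ++ [tmp_djf], acc.2.2.1 ++ [tmp_mam],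
       acc.2.2.2.1 ++ [tmp_jja], acc.2.2.2.2 ++ [tmp_son]))
    ([], [], [], [], [])

-- ===== PORT B =====
-- module-level _BUCKETS table (Python dict, int keys)
def pvBuckets : PySem.Dict Int (List String) := PySem.Dict.ofList
  [(0, ["djf"]),
   (1, ["ann", "djf"]), (2, ["ann", "djf"]),
   (3, ["ann", "mam"]), (4, ["ann", "mam"]), (5, ["ann", "mam"]),
   (6, ["ann", "jja"]), (7, ["ann", "jja"]), (8, ["ann", "jja"]),
   (9, ["ann", "son"]), (10, ["ann", "son"]), (11, ["ann", "son"]),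
   (12, ["ann"])]

-- Python `_BUCKETS[tok]` / `row[k]` / `out[k]` would raise KeyError on a missing key;
-- every key used is present, so getD/modify with default [] is exact here.
def create_ann_seas_lst_alt (yrmat : List Int) : List (List String) × List (List String) × List (List String) × List (List String) × List (List String) :=
  let out0 : PySem.Dict String (List (List String)) :=
    PySem.Dict.ofList [("ann", []), ("djf", []), ("mam", []), ("jja", []), ("son", [])]
  let out := yrmat.foldl
    (fun out yr =>
      let row0 : PySem.Dict String (List String) :=
        PySem.Dict.ofList [("ann", []), ("djf", []), ("mam", []), ("jja", []), ("son", [])]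
      let row := (PySem.List.pyRange 0 13 1).foldl
        (fun row tok =>
          let s := if tok == 0 then pvYM (yr - 1) 12 else pvYM yr tok
          (PySem.Dict.getD pvBuckets tok []).foldl
            (fun row k => PySem.Dict.modify row k [] (fun l => l ++ [s])) row)
        row0
      out.keys.foldl
        (fun o k => PySem.Dict.modify o k [] (fun l => l ++ [PySem.Dict.getD row k []])) out)
    out0
  (out.getD "ann" [], out.getD "djf" [], out.getD "mam" [], out.getD "jja" [], out.getD "son" [])

-- ===== PRECONDITION & SPEC =====
def Spec_create_ann_seas_lst (yrmat : List Int) (out : List (List String) × List (List String) × List (List String) × List (List String) × List (List String)) : Prop := out = create_ann_seas_lst_alt yrmat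
instance (yrmat : List Int) (out : List (List String) × List (List String) × List (List String) × List (List String) × List (List String)) : Decidable (Spec_create_ann_seas_lst yrmat out) := by unfold Spec_create_ann_seas_lst; infer_instance

-- ===== CLAIM (what is proved, stated in full; the proofs are below) =====
def Claim_equal_create_ann_seas_lst : Prop := ∀ (yrmat : List Int), Dom_create_ann_seas_lst yrmat → Spec_create_ann_seas_lst yrmat (create_ann_seas_lst yrmat)

-- ===== LEMMAS AND PROOFS =====

-- the five per-year rows, as A computes them
def pvAnnRow (yr : Int) : List String := (PySem.List.pyRange 0 12 1).foldl (fun l mi => l ++ [pvYM yr (mi + 1)]) []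
def pvDjfRow (yr : Int) : List String := ([0, 1] : List Int).foldl (fun l mi => l ++ [pvYM yr (mi + 1)]) (([] : List String) ++ [pvFmt0 4 (yr - 1) ++ "12"])
def pvMamRow (yr : Int) : List String := ([2, 3, 4] : List Int).foldl (fun l mi => l ++ [pvYM yr (mi + 1)]) []
def pvJjaRow (yr : Int) : List String := ([5, 6, 7] : List Int).foldl (fun l mi => l ++ [pvYM yr (mi + 1)]) []
def pvSonRow (yr : Int) : List String := ([8, 9, 10] : List Int).foldl (fun l mi => l ++ [pvYM yr (mi + 1)]) []

-- A's per-year loop body, named so the induction can speak about it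
def pvAStep (acc : List (List String) × List (List String) × List (List String) × List (List String) × List (List String)) (yr : Int) : List (List String) × List (List String) × List (List String) × List (List String) × List (List String) :=
  (acc.1 ++ [pvAnnRow yr], acc.2.1 ++ [pvDjfRow yr], acc.2.2.1 ++ [pvMamRow yr],
   acc.2.2.2.1 ++ [pvJjaRow yr], acc.2.2.2.2 ++ [pvSonRow yr])

lemma pvAFold_eq (ys : List Int) (a d m j s : List (List String)) :
    ys.foldl pvAStep (a, d, m, j, s) =
      (a ++ ys.map pvAnnRow, d ++ ys.map pvDjfRow, m ++ ys.map pvMamRow,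
       j ++ ys.map pvJjaRow, s ++ ys.map pvSonRow) := by
  induction ys generalizing a d m j s with
  | nil => simp
  | cons y ys ih =>
    simp only [List.foldl_cons, pvAStep, List.map_cons, ih]
    simp

-- B-side names (all definitionally the subterms of create_ann_seas_lst_alt)
def pvRow0 : PySem.Dict String (List String) :=
  PySem.Dict.ofList [("ann", []), ("djf", []), ("mam", []), ("jja", []), ("son", [])]

def pvRow (yr : Int) : PySem.Dict String (List String) :=
  (PySem.List.pyRange 0 13 1).foldl
    (fun row tok =>
      let s := if tok == 0 then pvYM (yr - 1) 12 else pvYM yr tok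
      (PySem.Dict.getD pvBuckets tok []).foldl
        (fun row k => PySem.Dict.modify row k [] (fun l => l ++ [s])) row)
    pvRow0

def pvOut0 : PySem.Dict String (List (List String)) :=
  PySem.Dict.ofList [("ann", []), ("djf", []), ("mam", []), ("jja", []), ("son", [])]

def pvBStep (out : PySem.Dict String (List (List String))) (yr : Int) : PySem.Dict String (List (List String)) :=
  out.keys.foldl
    (fun o k => PySem.Dict.modify o k [] (fun l => l ++ [PySem.Dict.getD (pvRow yr) k []])) out

def pvKS : List String := ["ann", "djf", "mam", "jja", "son"]

lemma pyRange13 : PySem.List.pyRange 0 13 1 = [0,1,2,3,4,5,6,7,8,9,10,11,12] := by decide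
lemma hb0 : PySem.Dict.getD pvBuckets 0 [] = ["djf"] := by decide
lemma hb1 : PySem.Dict.getD pvBuckets 1 [] = ["ann","djf"] := by decide
lemma hb2 : PySem.Dict.getD pvBuckets 2 [] = ["ann","djf"] := by decide
lemma hb3 : PySem.Dict.getD pvBuckets 3 [] = ["ann","mam"] := by decide
lemma hb4 : PySem.Dict.getD pvBuckets 4 [] = ["ann","mam"] := by decide
lemma hb5 : PySem.Dict.getD pvBuckets 5 [] = ["ann","mam"] := by decide
lemma hb6 : PySem.Dict.getD pvBuckets 6 [] = ["ann","jja"] := by decide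
lemma hb7 : PySem.Dict.getD pvBuckets 7 [] = ["ann","jja"] := by decide
lemma hb8 : PySem.Dict.getD pvBuckets 8 [] = ["ann","jja"] := by decide
lemma hb9 : PySem.Dict.getD pvBuckets 9 [] = ["ann","son"] := by decide
lemma hb10 : PySem.Dict.getD pvBuckets 10 [] = ["ann","son"] := by decide
lemma hb11 : PySem.Dict.getD pvBuckets 11 [] = ["ann","son"] := by decide
lemma hb12 : PySem.Dict.getD pvBuckets 12 [] = ["ann"] := by decide
lemma hr0a : pvRow0.getD "ann" [] = [] := by decide
lemma hr0d : pvRow0.getD "djf" [] = [] := by decide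
lemma hr0m : pvRow0.getD "mam" [] = [] := by decide
lemma hr0j : pvRow0.getD "jja" [] = [] := by decide
lemma hr0s : pvRow0.getD "son" [] = [] := by decide
lemma ho0a : pvOut0.getD "ann" [] = [] := by decide
lemma ho0d : pvOut0.getD "djf" [] = [] := by decide
lemma ho0m : pvOut0.getD "mam" [] = [] := by decide
lemma ho0j : pvOut0.getD "jja" [] = [] := by decide
lemma ho0s : pvOut0.getD "son" [] = [] := by decide

-- the token-stream row dict holds exactly A's five per-year rows
lemma rowAnn (yr : Int) : (pvRow yr).getD "ann" [] = pvAnnRow yr := by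
  have hlit : pvAnnRow yr = [pvYM yr 1, pvYM yr 2, pvYM yr 3, pvYM yr 4, pvYM yr 5, pvYM yr 6, pvYM yr 7, pvYM yr 8, pvYM yr 9, pvYM yr 10, pvYM yr 11, pvYM yr 12] := rfl
  unfold pvRow
  rw [pyRange13]
  simp only [List.foldl_cons, List.foldl_nil, hb0, hb1, hb2, hb3, hb4, hb5, hb6, hb7, hb8, hb9, hb10, hb11, hb12]
  simp [PySem.Dict.getD_modify, hr0a, hlit]

lemma rowDjf (yr : Int) : (pvRow yr).getD "djf" [] = pvDjfRow yr := by
  have hlit : pvDjfRow yr = [pvYM (yr - 1) 12, pvYM yr 1, pvYM yr 2] := by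
    show _ = [pvFmt0 4 (yr - 1) ++ pvFmt0 2 12, pvYM yr 1, pvYM yr 2]
    rfl
  unfold pvRow
  rw [pyRange13]
  simp only [List.foldl_cons, List.foldl_nil, hb0, hb1, hb2, hb3, hb4, hb5, hb6, hb7, hb8, hb9, hb10, hb11, hb12]
  simp [PySem.Dict.getD_modify, hr0d, hlit]

lemma rowMam (yr : Int) : (pvRow yr).getD "mam" [] = pvMamRow yr := by
  have hlit : pvMamRow yr = [pvYM yr 3, pvYM yr 4, pvYM yr 5] := rfl
  unfold pvRow
  rw [pyRange13]
  simp only [List.foldl_cons, List.foldl_nil, hb0, hb1, hb2, hb3, hb4, hb5, hb6, hb7, hb8, hb9, hb10, hb11, hb12]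
  simp [PySem.Dict.getD_modify, hr0m, hlit]

lemma rowJja (yr : Int) : (pvRow yr).getD "jja" [] = pvJjaRow yr := by
  have hlit : pvJjaRow yr = [pvYM yr 6, pvYM yr 7, pvYM yr 8] := rfl
  unfold pvRow
  rw [pyRange13]
  simp only [List.foldl_cons, List.foldl_nil, hb0, hb1, hb2, hb3, hb4, hb5, hb6, hb7, hb8, hb9, hb10, hb11, hb12]
  simp [PySem.Dict.getD_modify, hr0j, hlit]

lemma rowSon (yr : Int) : (pvRow yr).getD "son" [] = pvSonRow yr := by
  have hlit : pvSonRow yr = [pvYM yr 9, pvYM yr 10, pvYM yr 11] := rfl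
  unfold pvRow
  rw [pyRange13]
  simp only [List.foldl_cons, List.foldl_nil, hb0, hb1, hb2, hb3, hb4, hb5, hb6, hb7, hb8, hb9, hb10, hb11, hb12]
  simp [PySem.Dict.getD_modify, hr0s, hlit]

-- one outer step preserves the key list and appends the five rows
lemma pvBStep_keys (out : PySem.Dict String (List (List String))) (yr : Int) (h : out.keys = pvKS) :
    (pvBStep out yr).keys = pvKS := by
  unfold pvBStep
  rw [h, PySem.Dict.keys_foldl_modify, h]
  decide

lemma pvBStep_getD (out : PySem.Dict String (List (List String))) (yr : Int) (h : out.keys = pvKS) (k : String) (hk : k ∈ pvKS) :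
    (pvBStep out yr).getD k [] = out.getD k [] ++ [(pvRow yr).getD k []] := by
  unfold pvBStep
  rw [h]
  simp only [pvKS, List.foldl_cons, List.foldl_nil]
  simp only [pvKS, List.mem_cons] at hk
  rcases hk with rfl | rfl | rfl | rfl | rfl | h
  · simp [PySem.Dict.getD_modify]
  · simp [PySem.Dict.getD_modify]
  · simp [PySem.Dict.getD_modify]
  · simp [PySem.Dict.getD_modify]
  · simp [PySem.Dict.getD_modify]
  · simp at h

lemma pvBFold (ys : List Int) (out : PySem.Dict String (List (List String))) (h : out.keys = pvKS) :
    (ys.foldl pvBStep out).keys = pvKS ∧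
    (ys.foldl pvBStep out).getD "ann" [] = out.getD "ann" [] ++ ys.map pvAnnRow ∧
    (ys.foldl pvBStep out).getD "djf" [] = out.getD "djf" [] ++ ys.map pvDjfRow ∧
    (ys.foldl pvBStep out).getD "mam" [] = out.getD "mam" [] ++ ys.map pvMamRow ∧
    (ys.foldl pvBStep out).getD "jja" [] = out.getD "jja" [] ++ ys.map pvJjaRow ∧
    (ys.foldl pvBStep out).getD "son" [] = out.getD "son" [] ++ ys.map pvSonRow := by
  induction ys generalizing out with
  | nil => exact ⟨h, by simp, by simp, by simp, by simp, by simp⟩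
  | cons y ys ih =>
    obtain ⟨k1, e1, e2, e3, e4, e5⟩ := ih (pvBStep out y) (pvBStep_keys out y h)
    have ga := pvBStep_getD out y h "ann" (by simp [pvKS])
    have gd := pvBStep_getD out y h "djf" (by simp [pvKS])
    have gm := pvBStep_getD out y h "mam" (by simp [pvKS])
    have gj := pvBStep_getD out y h "jja" (by simp [pvKS])
    have gs := pvBStep_getD out y h "son" (by simp [pvKS])
    refine ⟨k1, ?_, ?_, ?_, ?_, ?_⟩ <;>
      simp [List.foldl_cons, e1, e2, e3, e4, e5, ga, gd, gm, gj, gs,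
        rowAnn, rowDjf, rowMam, rowJja, rowSon]

lemma pvA_eq (yrmat : List Int) :
    create_ann_seas_lst yrmat =
      (yrmat.map pvAnnRow, yrmat.map pvDjfRow, yrmat.map pvMamRow,
       yrmat.map pvJjaRow, yrmat.map pvSonRow) := by
  show yrmat.foldl pvAStep ([], [], [], [], []) = _
  rw [pvAFold_eq]
  simp

lemma pvAlt_eq (yrmat : List Int) :
    create_ann_seas_lst_alt yrmat =
      (yrmat.map pvAnnRow, yrmat.map pvDjfRow, yrmat.map pvMamRow,
       yrmat.map pvJjaRow, yrmat.map pvSonRow) := by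
  obtain ⟨_, e1, e2, e3, e4, e5⟩ := pvBFold yrmat pvOut0 (by decide)
  show ((yrmat.foldl pvBStep pvOut0).getD "ann" [], (yrmat.foldl pvBStep pvOut0).getD "djf" [],
        (yrmat.foldl pvBStep pvOut0).getD "mam" [], (yrmat.foldl pvBStep pvOut0).getD "jja" [],
        (yrmat.foldl pvBStep pvOut0).getD "son" []) = _
  rw [e1, e2, e3, e4, e5]
  simp [ho0a, ho0d, ho0m, ho0j, ho0s]

-- ===== VERDICT (by name: the statement is the Claim_ definition above) =====
theorem create_ann_seas_lst_spec : Claim_equal_create_ann_seas_lst := by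
  intro yrmat _
  show create_ann_seas_lst yrmat = create_ann_seas_lst_alt yrmat
  rw [pvA_eq, pvAlt_eq]
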